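-- pv_equiv track=rewrite | github.com/Hakyoungan/pps | week3/A048_안하경_20240717.py | solution
-- ===== SOURCE A (Python) =====
-- def solution(word):
--     seen = set()
--     last_char = ""
--     for char in word:
--         if char != last_char:
--             if char in seen:
--                 return False
--             seen.add(char)
--             last_char = char
--     return True
-- ===== SOURCE B (Python) =====
-- def solution(word):
--     while word:
--         c = word[0]
--         word = word.lstrip(c)
--         if c in word:
--             return False
--     return True
-- ===== Notes on version B (the rewrite author's own statement) =====
-- stated objective: alternative
-- what changed: B repeatedly strips the leading run of the current first character (lstrip) and checks that this character does not occur in the remainder, consuming the word run by run with no auxiliary seen-set or last_char state, instead of A's single character-by-character scan maintaining a seen set.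
import Mathlib
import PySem

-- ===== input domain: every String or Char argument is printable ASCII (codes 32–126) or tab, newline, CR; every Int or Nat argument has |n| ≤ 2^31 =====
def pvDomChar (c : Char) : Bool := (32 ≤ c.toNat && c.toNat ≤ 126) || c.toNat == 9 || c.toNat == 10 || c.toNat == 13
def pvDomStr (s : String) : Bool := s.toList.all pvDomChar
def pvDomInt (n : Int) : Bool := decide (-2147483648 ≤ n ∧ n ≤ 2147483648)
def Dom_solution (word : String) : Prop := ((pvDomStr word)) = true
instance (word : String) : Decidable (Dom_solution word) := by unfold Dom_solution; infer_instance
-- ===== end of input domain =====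

-- B consumes the word run by run (strip leading run, check its char absent from the remainder),
-- with no seen-set or last_char state, instead of A's single scan with a seen set (alternative).


-- ===== PORT A =====
-- The loop with its two mutable variables and early 'return False'; Python's initial
-- last_char = "" (equal to no 1-char string) is modelled as 'none : Option Char'.
def solGo : List Char → PySem.Set Char → Option Char → Bool
  | [], _, _ => true
  | c :: rest, seen, last =>
    if some c ≠ last then
      if PySem.Set.contains seen c then false
      else solGo rest (PySem.Set.add seen c) (some c)
    else solGo rest seen last

def solution (word : String) : Bool := solGo word.toList PySem.Set.empty none

-- ===== PORT B =====
-- the while loop: c = word[0]; word = word.lstrip(c); if c in word: return False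
def altGo : List Char → Bool
  | [] => true
  | c :: rest =>
    let w := List.dropWhile (fun x => x == c) (c :: rest)  -- word.lstrip(c)
    !(w.contains c) && altGo w                             -- 'c in word' → early False
termination_by l => l.length
decreasing_by
  simp only [List.dropWhile_cons, beq_self_eq_true, if_pos, List.length_cons]
  have := List.length_dropWhile_le (fun x => x == c) rest
  omega

def solution_alt (word : String) : Bool := altGo word.toList

-- ===== PRECONDITION & SPEC =====
def Spec_solution (word : String) (out : Bool) : Prop := out = solution_alt word
instance (word : String) (out : Bool) : Decidable (Spec_solution word out) := by unfold Spec_solution; infer_instance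

-- ===== CLAIM (what is proved, stated in full; the proofs are below) =====
def Claim_equal_solution : Prop := ∀ (word : String), Dom_solution word → Spec_solution word (solution word)

-- ===== LEMMAS AND PROOFS =====

-- the run keys of l, given the previous character (proof-side reference form)
def collapse : Option Char → List Char → List Char
  | _, [] => []
  | last, c :: rest => if some c = last then collapse last rest else c :: collapse (some c) rest

theorem solGo_eq (l : List Char) (seen : PySem.Set Char) (last : Option Char)
    (hnd : seen.Nodup) :
    solGo l seen last = decide ((seen ++ collapse last l).Nodup) := by
  induction l generalizing seen last with
  | nil => simp [solGo, collapse, hnd]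
  | cons c rest ih =>
    by_cases h : some c = last
    · have hstep : solGo (c :: rest) seen last = solGo rest seen last := by
        simp only [solGo]
        rw [if_neg (by simpa using h)]
      have hcol : collapse last (c :: rest) = collapse last rest := by
        simp only [collapse]
        rw [if_pos h]
      rw [hstep, hcol]
      exact ih seen last hnd
    · have hsolGo : solGo (c :: rest) seen last
          = if PySem.Set.contains seen c then false
            else solGo rest (PySem.Set.add seen c) (some c) := by
        simp only [solGo]
        rw [if_pos h]
      by_cases hm : c ∈ seen
      · have hc : PySem.Set.contains seen c = true := (PySem.Set.contains_iff _ _).mpr hm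
        have hnot : ¬ ((seen ++ collapse last (c :: rest)).Nodup) := by
          simp only [collapse]
          rw [if_neg h]
          rw [List.nodup_append]
          rintro ⟨-, -, hdisj⟩
          exact hdisj c hm c List.mem_cons_self rfl
        rw [hsolGo, hc]
        simp [hnot]
      · have hcontains : PySem.Set.contains seen c = false := by
          rw [Bool.eq_false_iff]
          intro hc
          exact hm ((PySem.Set.contains_iff _ _).mp hc)
        have hadd : PySem.Set.add seen c = seen ++ [c] := PySem.Set.add_of_not_mem hm
        have hnd' : (PySem.Set.add seen c).Nodup := by
          rw [hadd, List.nodup_append]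
          refine ⟨hnd, List.nodup_singleton c, ?_⟩
          intro a ha b hb
          simp only [List.mem_singleton] at hb
          subst hb
          exact fun e => hm (e ▸ ha)
        have hih := ih (PySem.Set.add seen c) (some c) hnd'
        rw [hadd] at hih
        rw [hsolGo, hcontains]
        show solGo rest (seen.add c) (some c) = decide ((seen ++ collapse last (c :: rest)).Nodup)
        rw [hadd, hih]
        have hcol : collapse last (c :: rest) = c :: collapse (some c) rest := by
          simp only [collapse]
          rw [if_neg h]
        simp only [hcol, List.append_assoc, List.singleton_append]

theorem collapse_some_eq (c : Char) (l : List Char) :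
    collapse (some c) l = collapse none (List.dropWhile (fun x => x == c) l) := by
  induction l with
  | nil => simp [collapse]
  | cons d t ih =>
    by_cases h : d = c
    · subst h
      simp only [collapse, List.dropWhile_cons, beq_self_eq_true, if_pos]
      simpa using ih
    · have hbeq : (d == c) = false := by simp [h]
      simp only [List.dropWhile_cons, hbeq, if_neg, Bool.false_eq_true, not_false_iff]
      simp only [collapse]
      rw [if_neg (by simpa using h), if_neg (by simp)]

theorem mem_of_mem_collapse {x : Char} (last : Option Char) (l : List Char)
    (h : x ∈ collapse last l) : x ∈ l := by
  induction l generalizing last with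
  | nil => simp [collapse] at h
  | cons c rest ih =>
    simp only [collapse] at h
    split_ifs at h with hc
    · exact List.mem_cons_of_mem _ (ih _ h)
    · rcases List.mem_cons.mp h with h | h
      · exact h ▸ List.mem_cons_self
      · exact List.mem_cons_of_mem _ (ih _ h)

theorem mem_collapse_of_mem {x : Char} (last : Option Char) (l : List Char)
    (h : x ∈ l) : x ∈ collapse last l ∨ some x = last := by
  induction l generalizing last with
  | nil => simp at h
  | cons c rest ih =>
    simp only [collapse]
    split_ifs with hc
    · rcases List.mem_cons.mp h with rfl | h
      · exact Or.inr hc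
      · exact ih _ h
    · rcases List.mem_cons.mp h with rfl | h
      · exact Or.inl List.mem_cons_self
      · rcases ih (some c) h with hm | he
        · exact Or.inl (List.mem_cons_of_mem _ hm)
        · exact Or.inl (by rw [Option.some_inj] at he; exact he ▸ List.mem_cons_self)

theorem mem_collapse_none {x : Char} (l : List Char) : x ∈ collapse none l ↔ x ∈ l := by
  constructor
  · exact mem_of_mem_collapse none l
  · intro h
    rcases mem_collapse_of_mem none l h with hm | he
    · exact hm
    · exact absurd he (by simp)

theorem altGo_eq (l : List Char) : altGo l = decide ((collapse none l).Nodup) := by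
  induction l using altGo.induct with
  | case1 => simp [altGo, collapse]
  | case2 c rest w ih =>
    have hw : w = List.dropWhile (fun x => x == c) rest := by
      simp [w]
    have hcol : collapse none (c :: rest) = c :: collapse none w := by
      simp only [collapse]
      rw [if_neg (by simp), hw, collapse_some_eq]
    have hmem : (w.contains c) = decide (c ∈ collapse none w) := by
      by_cases hm : c ∈ w
      · simp [hm, (mem_collapse_none w).mpr hm]
      · have : c ∉ collapse none w := fun h => hm ((mem_collapse_none w).mp h)
        simp [hm, this]
    have hstep : altGo (c :: rest) = (!(w.contains c) && altGo w) := by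
      rw [altGo]
    rw [hstep, hcol, ih, hmem]
    by_cases h1 : c ∈ collapse none w <;> by_cases h2 : (collapse none w).Nodup <;>
      simp [h1, h2, List.nodup_cons]

-- ===== VERDICT (by name: the statement is the Claim_ definition above) =====
theorem solution_spec : Claim_equal_solution := by
  intro word _
  unfold Spec_solution solution solution_alt
  rw [solGo_eq word.toList PySem.Set.empty none List.nodup_nil, altGo_eq]
  rfl
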